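-- pv_equiv track=rewrite | github.com/Ashvin-Ranjan/NLP-Learning | ngrams/letter_markov/letter_markov.py | generate_ngram_map
-- ===== SOURCE A (Python) =====
-- INITIAL_N_VALUE = 12
--
-- def generate_ngram_map(text, n=INITIAL_N_VALUE):
--     letters = list(text)
--     ngrams = list(zip(*[letters[i:] for i in range(n+1)]))
--     ngram_map = {}
--     for ngram in ngrams:
--         key = "".join(ngram[0:-1])
--         if key in ngram_map:
--             if ngram[-1] in ngram_map[key]:
--                 ngram_map[key][ngram[-1]] += 1
--             else:
--                 ngram_map[key][ngram[-1]] = 1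
--         else:
--             ngram_map[key] = {ngram[-1]: 1}
--     return ngram_map
-- ===== SOURCE B (Python) =====
-- INITIAL_N_VALUE = 12
--
-- def generate_ngram_map(text, n=INITIAL_N_VALUE):
--     if n < 0:
--         return {}
--     # stage 1: flat counter of (prefix, next-letter) pairs
--     pairs = {}
--     for i in range(len(text) - n):
--         p = (text[i:i + n], text[i + n])
--         pairs[p] = pairs.get(p, 0) + 1
--     # stage 2: group the counted pairs into the nested map
--     ngram_map = {}
--     for (key, nxt), c in pairs.items():
--         ngram_map.setdefault(key, {})[nxt] = c
--     return ngram_map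
-- ===== Notes on version B (the rewrite author's own statement) =====
-- stated objective: faster
-- what changed: Replaces A's single pass that zip-transposes n+1 shifted list copies into (n+1)-tuples and updates a nested dict-of-dicts per tuple by a two-stage algorithm: a flat Counter-style dict over (prefix, next-letter) string-slice pairs, then a grouping pass assembling the nested map from the counted pairs.
import Mathlib
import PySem

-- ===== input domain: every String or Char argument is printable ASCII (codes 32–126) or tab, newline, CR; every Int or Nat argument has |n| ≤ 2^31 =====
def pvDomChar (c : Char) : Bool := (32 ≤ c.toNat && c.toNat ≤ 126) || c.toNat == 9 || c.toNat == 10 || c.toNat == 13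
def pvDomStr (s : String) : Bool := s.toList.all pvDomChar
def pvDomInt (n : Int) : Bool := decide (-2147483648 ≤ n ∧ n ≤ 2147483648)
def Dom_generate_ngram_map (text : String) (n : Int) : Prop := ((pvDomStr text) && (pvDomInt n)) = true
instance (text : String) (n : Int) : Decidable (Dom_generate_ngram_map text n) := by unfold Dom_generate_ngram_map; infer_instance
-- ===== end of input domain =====

-- B replaces A's single pass of nested dict-of-dicts updates over zip-transposed ngram tuples by a
-- two-stage algorithm: a flat counter over (prefix, next-letter) pairs, then a grouping pass
-- (measurably faster: no shifted list copies or tuple materialization).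

-- ===== PORT A =====
-- zip(*lists): emit the tuple of heads while every list is nonempty; zip of no lists emits nothing.
def pvZipStar (ls : List (List Char)) : List (List Char) :=
  if h : ls ≠ [] ∧ ls.all (fun l => !l.isEmpty) then
    (ls.map (fun l => l.headD ' ')) :: pvZipStar (ls.map (fun l => l.tail))
  else []
termination_by (ls.headD []).length
decreasing_by
  rcases ls with _ | ⟨x, xs⟩
  · exact absurd rfl h.1
  · obtain ⟨-, hall⟩ := h
    simp only [List.all_cons, Bool.and_eq_true, Bool.not_eq_true'] at hall
    simp only [List.map_cons, List.headD_cons]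
    cases x with
    | nil => simp at hall
    | cons a as => simp

-- loop body of A ('ngram[-1]' is always in range: zip tuples here are nonempty, so the pyGetD default is never read)
def pvStepA (d : PySem.Dict String (PySem.Dict String Int)) (ngram : List Char) :
    PySem.Dict String (PySem.Dict String Int) :=
  let key := String.mk (PySem.List.slice ngram (some 0) (some (-1)))
  let last := String.mk [PySem.List.pyGetD ngram (-1) ' ']
  if d.contains key then
    let inner := d.getD key PySem.Dict.empty
    if inner.contains last then d.insert key (inner.insert last (inner.getD last 0 + 1))
    else d.insert key (inner.insert last 1)
  else d.insert key ((PySem.Dict.empty : PySem.Dict String Int).insert last 1)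

def generate_ngram_map (text : String) (n : Int) : List (String × List (String × Int)) :=
  let letters := text.toList
  let ngrams := pvZipStar ((PySem.List.pyRange 0 (n + 1) 1).map
    (fun i => PySem.List.slice letters (some i) none))
  let ngram_map := ngrams.foldl pvStepA PySem.Dict.empty
  ngram_map.items.map (fun p => (p.1, p.2.items))

-- ===== PORT B =====
-- stage-1 loop body of B ('text[i+n]' is always in range for i in range(len(text)-n); the pyGetD default is never read)
def pvPairStep (letters : List Char) (n : Int) (d : PySem.Dict (String × String) Int) (i : Int) :
    PySem.Dict (String × String) Int :=
  let p := (String.mk (PySem.List.slice letters (some i) (some (i + n))),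
            String.mk [PySem.List.pyGetD letters (i + n) ' '])
  d.insert p (d.getD p 0 + 1)

-- stage-2 loop body of B: ngram_map.setdefault(key, {})[nxt] = c
def pvGroupStep (d : PySem.Dict String (PySem.Dict String Int)) (e : (String × String) × Int) :
    PySem.Dict String (PySem.Dict String Int) :=
  (d.setdefault e.1.1 PySem.Dict.empty).insert e.1.1
    (((d.setdefault e.1.1 PySem.Dict.empty).getD e.1.1 PySem.Dict.empty).insert e.1.2 e.2)

def generate_ngram_map_alt (text : String) (n : Int) : List (String × List (String × Int)) :=
  if n < 0 then []
  else
    let pairs := (PySem.List.pyRange 0 (PySem.Str.len text - n) 1).foldl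
      (pvPairStep text.toList n) PySem.Dict.empty
    let ngram_map := pairs.items.foldl pvGroupStep PySem.Dict.empty
    ngram_map.items.map (fun p => (p.1, p.2.items))

-- ===== PRECONDITION & SPEC =====
def Spec_generate_ngram_map (text : String) (n : Int) (out : List (String × List (String × Int))) : Prop := out = generate_ngram_map_alt text n
instance (text : String) (n : Int) (out : List (String × List (String × Int))) : Decidable (Spec_generate_ngram_map text n out) := by unfold Spec_generate_ngram_map; infer_instance

-- ===== CLAIM (what is proved, stated in full; the proofs are below) =====
def Claim_equal_generate_ngram_map : Prop := ∀ (text : String) (n : Int), Dom_generate_ngram_map text n → Spec_generate_ngram_map text n (generate_ngram_map text n)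

-- ===== LEMMAS AND PROOFS =====

-- the (prefix, next-letter) pair produced at window position k
def pvPairAt (letters : List Char) (nn k : Nat) : String × String :=
  (String.mk ((letters.drop k).take nn), String.mk [letters.getD (k + nn) ' '])

-- A's nested update, written on the pair
def pvUpd (d : PySem.Dict String (PySem.Dict String Int)) (q : String × String) :
    PySem.Dict String (PySem.Dict String Int) :=
  let inner := d.getD q.1 PySem.Dict.empty
  d.insert q.1 (inner.insert q.2 (inner.getD q.2 0 + 1))

-- B's grouping step with the setdefault unfolded
def pvG (d : PySem.Dict String (PySem.Dict String Int)) (e : (String × String) × Int) :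
    PySem.Dict String (PySem.Dict String Int) :=
  d.insert e.1.1 ((d.getD e.1.1 PySem.Dict.empty).insert e.1.2 e.2)

lemma pvZipStar_nil : pvZipStar [] = [] := by
  rw [pvZipStar]; simp

lemma pv_headD_drop (l : List Char) (k : Nat) (h : k < l.length) :
    (l.drop k).headD ' ' = l[k] := by
  rw [List.headD_eq_head?, List.head?_drop, List.getElem?_eq_getElem h]
  rfl

-- zip(*[letters[i:] for i in range(m)]) is the list of length-m windows of letters
lemma pvZipStar_windows (m : Nat) (hm : 0 < m) (letters : List Char) :
    pvZipStar ((List.range m).map (fun k => letters.drop k)) =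
      (List.range (letters.length + 1 - m)).map (fun j => (letters.drop j).take m) := by
  induction letters with
  | nil =>
    rw [pvZipStar, dif_neg]
    · have : 0 + 1 - m = 0 := by omega
      simp [this]
    · rintro ⟨-, hall⟩
      simp only [List.all_map, List.all_eq_true] at hall
      have h0 : 0 ∈ List.range m := List.mem_range.mpr hm
      have := hall 0 h0
      simp at this
  | cons c rest ih =>
    by_cases hml : m ≤ rest.length + 1
    · have hcond : ((List.range m).map (fun k => (c :: rest).drop k)) ≠ [] ∧
          ((List.range m).map (fun k => (c :: rest).drop k)).all (fun l => !l.isEmpty) := by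
        constructor
        · simp [List.range_eq_nil]; omega
        · simp only [List.all_map, List.all_eq_true]
          intro k hk
          have hk' : k < m := List.mem_range.mp hk
          simp only [Function.comp_apply, Bool.not_eq_true', List.isEmpty_eq_false_iff,
            ← List.length_pos_iff, List.length_drop]
          simp; omega
      rw [pvZipStar, dif_pos hcond]
      have hheads : ((List.range m).map (fun k => (c :: rest).drop k)).map (fun l => l.headD ' ')
          = (c :: rest).take m := by
        rw [List.map_map]
        apply List.ext_getElem
        · simp; omega
        · intro i h1 h2
          have h1' : i < m := by simpa using h1
          have hi : i < (c :: rest).length := by simp; omega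
          simp only [List.getElem_map, List.getElem_range, Function.comp_apply]
          rw [List.getElem_take, pv_headD_drop _ _ hi]
      have htails : ((List.range m).map (fun k => (c :: rest).drop k)).map (fun l => l.tail)
          = (List.range m).map (fun k => rest.drop k) := by
        rw [List.map_map]
        apply List.map_congr_left
        intro k _
        simp only [Function.comp_apply, List.tail_drop, List.drop_succ_cons]
      rw [hheads, htails, ih]
      have hlen : (c :: rest).length + 1 - m = (rest.length + 1 - m) + 1 := by simp; omega
      rw [hlen, List.range_succ_eq_map, List.map_cons, List.map_map]
      congr 1
    · rw [pvZipStar, dif_neg]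
      · have h0 : rest.length + 1 + 1 - m = 0 := by omega
        simp [h0]
      · rintro ⟨-, hall⟩
        simp only [List.all_map, List.all_eq_true] at hall
        have hmem : m - 1 ∈ List.range m := List.mem_range.mpr (by omega)
        have := hall (m - 1) hmem
        have hemp : (c :: rest).drop (m - 1) = [] := by
          apply List.drop_eq_nil_of_le
          simp; omega
        simp [Function.comp, hemp] at this

-- a full window splits as prefix ++ [next letter]
lemma pv_window_eq (letters : List Char) (nn k : Nat) (h : k + nn < letters.length) :
    (letters.drop k).take (nn + 1) = (letters.drop k).take nn ++ [letters[k + nn]] := by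
  rw [List.take_add_one]
  congr 1
  rw [List.getElem?_drop, List.getElem?_eq_getElem h]
  rfl

lemma pv_getD_at (letters : List Char) (nn k : Nat) (h : k + nn < letters.length) :
    letters.getD (k + nn) ' ' = letters[k + nn] := by
  rw [List.getD_eq_getElem?_getD, List.getElem?_eq_getElem h]
  rfl

-- A's branchy update body IS pvUpd on the pair of the window
lemma pv_stepA_eq (letters : List Char) (nn k : Nat) (h : k + nn < letters.length)
    (d : PySem.Dict String (PySem.Dict String Int)) :
    pvStepA d ((letters.drop k).take (nn + 1)) = pvUpd d (pvPairAt letters nn k) := by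
  have hkey : PySem.List.slice ((letters.drop k).take (nn + 1)) (some 0) (some (-1))
      = (letters.drop k).take nn := by
    rw [PySem.List.slice_zero_start, PySem.List.slice_to_neg_one, pv_window_eq letters nn k h,
      List.dropLast_concat]
  have hlast : PySem.List.pyGetD ((letters.drop k).take (nn + 1)) (-1) ' ' = letters[k + nn] := by
    rw [pv_window_eq letters nn k h, PySem.List.pyGetD_neg_one_append_singleton]
  unfold pvStepA pvUpd pvPairAt
  simp only [hkey, hlast, pv_getD_at letters nn k h]
  set key := String.mk ((letters.drop k).take nn)
  set nxt := String.mk [letters[k + nn]]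
  by_cases hc : d.contains key
  · by_cases hic : (d.getD key PySem.Dict.empty).contains nxt
    · simp [hc, hic]
    · simp [hc, hic, PySem.Dict.getD_of_not_contains _ _ (Bool.of_not_eq_true hic)]
  · simp [hc, PySem.Dict.getD_of_not_contains _ _ (Bool.of_not_eq_true hc),
      PySem.Dict.getD_empty]

-- B's stage-1 body on the pair of the window
lemma pv_pairStep_eq (letters : List Char) (nn k : Nat) (h : k + nn < letters.length)
    (d : PySem.Dict (String × String) Int) :
    pvPairStep letters (↑nn) d (↑k) = d.insert (pvPairAt letters nn k) (d.getD (pvPairAt letters nn k) 0 + 1) := by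
  have hc : (↑k + ↑nn : Int) = ((k + nn : Nat) : Int) := by push_cast; ring
  have hkeyB : PySem.List.slice letters (some ↑k) (some (↑k + ↑nn)) = (letters.drop k).take nn := by
    rw [hc, PySem.List.slice_natCast]
    congr 1
    omega
  have hnxtB : PySem.List.pyGetD letters (↑k + ↑nn) ' ' = letters.getD (k + nn) ' ' := by
    rw [hc, PySem.List.pyGetD_natCast]
  unfold pvPairStep pvPairAt
  simp only [hkeyB, hnxtB]

-- B's stage-2 body with the setdefault unfolded IS pvG
lemma pv_groupStep_eq (d : PySem.Dict String (PySem.Dict String Int)) (e : (String × String) × Int) :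
    pvGroupStep d e = pvG d e := by
  unfold pvGroupStep pvG
  by_cases hc : d.contains e.1.1
  · rw [PySem.Dict.setdefault_of_contains d _ hc]
  · rw [PySem.Dict.setdefault_of_not_contains d _ (Bool.of_not_eq_true hc)]
    rw [PySem.Dict.getD_insert_self, PySem.Dict.insert_insert_self,
      PySem.Dict.getD_of_not_contains _ _ (Bool.of_not_eq_true hc)]

-- two inserts at distinct keys commute when the first key is already present
lemma pv_insert_comm {κ ν : Type} [BEq κ] [LawfulBEq κ] (d : PySem.Dict κ ν) (k k' : κ) (v w : ν)
    (hc : d.contains k = true) (hne : k' ≠ k) :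
    (d.insert k v).insert k' w = (d.insert k' w).insert k v := by
  have hkk' : (k' == k) = false := by simp [hne]
  have hk'k : (k == k') = false := by simp [Ne.symm hne]
  apply PySem.Dict.ext
  by_cases hc' : d.contains k' = true
  · rw [PySem.Dict.items_insert_of_contains _ w
        (by rw [PySem.Dict.contains_insert]; simp [hc']),
      PySem.Dict.items_insert_of_contains _ v hc,
      PySem.Dict.items_insert_of_contains _ v
        (by rw [PySem.Dict.contains_insert]; simp [hc]),
      PySem.Dict.items_insert_of_contains _ w hc',
      List.map_map, List.map_map]
    apply List.map_congr_left
    intro p _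
    simp only [Function.comp_apply]
    by_cases h1 : (p.1 == k) = true
    · have hp : p.1 = k := eq_of_beq h1
      have h2 : (p.1 == k') = false := by rw [hp]; exact hk'k
      simp [h1, h2, hk'k]
    · by_cases h2 : (p.1 == k') = true
      · have hp : p.1 = k' := eq_of_beq h2
        simp [h1, h2, hkk']
      · simp [h1, h2]
  · have hic : (d.insert k v).contains k' = false := by
      rw [PySem.Dict.contains_insert, hkk']
      simpa using hc'
    rw [PySem.Dict.items_insert_of_not_contains _ w hic,
      PySem.Dict.items_insert_of_contains _ v hc,
      PySem.Dict.items_insert_of_contains _ v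
        (by rw [PySem.Dict.contains_insert]; simp [hc]),
      PySem.Dict.items_insert_of_not_contains _ w (by simpa using hc'),
      List.map_append]
    simp only [List.map_cons, List.map_nil]
    have : (k' == k) = false := hkk'
    simp [this]

-- every pair key that occurs in L is present (outer and inner) in the grouped dict
lemma pv_mem_gfold (L : List ((String × String) × Int)) (q : String × String)
    (hq : q ∈ L.map Prod.fst) :
    (L.foldl pvG PySem.Dict.empty).contains q.1 = true ∧
      ((L.foldl pvG PySem.Dict.empty).getD q.1 PySem.Dict.empty).contains q.2 = true := by
  induction L using List.reverseRecOn with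
  | nil => simp at hq
  | append_singleton L e ih =>
    rw [List.foldl_append, List.foldl_cons, List.foldl_nil]
    rw [List.map_append, List.mem_append] at hq
    rcases hq with hq | hq
    · obtain ⟨h1, h2⟩ := ih hq
      constructor
      · rw [pvG, PySem.Dict.contains_insert, h1]
        simp
      · rw [pvG, PySem.Dict.getD_insert]
        by_cases he : q.1 = e.1.1
        · rw [if_pos he, ← he, PySem.Dict.contains_insert, h2]
          simp
        · rw [if_neg he]
          exact h2
    · simp only [List.mem_map, List.mem_singleton] at hq
      obtain rfl : e.1 = q := by simpa using hq
      constructor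
      · rw [pvG, PySem.Dict.contains_insert]
        simp
      · rw [pvG, PySem.Dict.getD_insert_self, PySem.Dict.contains_insert]
        simp

-- the nested count in A's fold is the pair count
lemma pv_getD_nfold (ps : List (String × String)) (q : String × String) :
    (((ps.foldl pvUpd PySem.Dict.empty).getD q.1 PySem.Dict.empty).getD q.2 0) = ps.count q := by
  induction ps using List.reverseRecOn with
  | nil => simp [PySem.Dict.getD_empty]
  | append_singleton ps p ih =>
    rw [List.foldl_append, List.foldl_cons, List.foldl_nil, List.count_append]
    simp only [pvUpd]
    rw [PySem.Dict.getD_insert]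
    by_cases h1 : q.1 = p.1
    · rw [if_pos h1, PySem.Dict.getD_insert]
      by_cases h2 : q.2 = p.2
      · rw [if_pos h2, ← h1, ← h2, ih]
        have hpq : p = q := by cases p; cases q; simp_all
        have hcnt : List.count q [p] = 1 := by simp [List.count_singleton, hpq]
        rw [hcnt]
        push_cast
        ring
      · rw [if_neg h2, ← h1, ih]
        have hpq : p ≠ q := by intro h; apply h2; rw [h]
        have hcnt : List.count q [p] = 0 := by
          simp [List.count_singleton, hpq]
        rw [hcnt]
        norm_num
    · rw [if_neg h1, ih]
      have hpq : p ≠ q := by intro h; apply h1; rw [h]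
      have hcnt : List.count q [p] = 0 := by
        simp [List.count_singleton, hpq]
      rw [hcnt]
      norm_num

-- replacing the count of one pair in the flat list re-groups to an in-place nested overwrite
lemma pv_bump (L : List ((String × String) × Int)) (q : String × String) (c' : Int)
    (hnd : (L.map Prod.fst).Nodup) (hq : q ∈ L.map Prod.fst) :
    ((L.map (fun p => if p.1 == q then (q, c') else p)).foldl pvG PySem.Dict.empty)
      = (L.foldl pvG PySem.Dict.empty).insert q.1
          (((L.foldl pvG PySem.Dict.empty).getD q.1 PySem.Dict.empty).insert q.2 c') := by
  induction L using List.reverseRecOn with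
  | nil => simp at hq
  | append_singleton L e ih =>
    rw [List.map_append] at hq hnd ⊢
    rw [List.map_singleton, List.foldl_append, List.foldl_append, List.foldl_cons,
      List.foldl_nil, List.foldl_cons, List.foldl_nil]
    have hnd' : (L.map Prod.fst).Nodup := (List.nodup_append.mp hnd).1
    by_cases heq : e.1 = q
    · -- the replaced entry is the last one; the prefix is untouched
      have hnotL : q ∉ L.map Prod.fst := by
        have hdisj := (List.nodup_append.mp hnd).2.2
        intro hmem
        have hme : q ∈ List.map Prod.fst [e] := by simp [heq]
        exact hdisj q hmem q hme rfl
      have hmapL : L.map (fun p => if p.1 == q then (q, c') else p) = L := by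
        conv_rhs => rw [← List.map_id L]
        apply List.map_congr_left
        intro p hp
        have hne : p.1 ≠ q := fun h => hnotL (h ▸ List.mem_map_of_mem (f := Prod.fst) hp)
        simp [hne]
      rw [hmapL]
      simp only [heq, beq_self_eq_true, if_pos]
      simp only [pvG, heq]
      rw [PySem.Dict.getD_insert_self, PySem.Dict.insert_insert_self,
        PySem.Dict.insert_insert_self]
    · -- the replaced entry is in the prefix
      have hqL : q ∈ L.map Prod.fst := by
        rcases List.mem_append.mp hq with h | h
        · exact h
        · exfalso
          have hqe : q = e.1 := by simpa using h
          exact heq hqe.symm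
      have hmape : (if (e.1 == q) = true then (q, c') else e) = e := by
        simp [heq]
      set D := L.foldl pvG PySem.Dict.empty with hD
      obtain ⟨hck, hcx⟩ := pv_mem_gfold L q hqL
      rw [hmape, ih hnd' hqL]
      by_cases hk : e.1.1 = q.1
      · -- same outer key, different inner key
        have hx : e.1.2 ≠ q.2 := by
          intro hx
          exact heq (Prod.ext_iff.mpr ⟨hk, hx⟩)
        simp only [pvG, hk]
        rw [PySem.Dict.getD_insert_self, PySem.Dict.insert_insert_self,
          PySem.Dict.getD_insert_self, PySem.Dict.insert_insert_self,
          pv_insert_comm _ q.2 e.1.2 c' e.2 hcx hx]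
      · -- different outer keys
        have g1 : (D.insert q.1 ((D.getD q.1 PySem.Dict.empty).insert q.2 c')).getD e.1.1
            PySem.Dict.empty = D.getD e.1.1 PySem.Dict.empty := by
          rw [PySem.Dict.getD_insert, if_neg hk]
        have g2 : (D.insert e.1.1 ((D.getD e.1.1 PySem.Dict.empty).insert e.1.2 e.2)).getD q.1
            PySem.Dict.empty = D.getD q.1 PySem.Dict.empty := by
          rw [PySem.Dict.getD_insert, if_neg (fun h => hk h.symm)]
        simp only [pvG]
        rw [g1, g2]
        exact pv_insert_comm D q.1 e.1.1 _ _ hck hk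
      
-- MAIN: A's one-pass nested fold equals B's group-of-counter
lemma pv_main (ps : List (String × String)) :
    ps.foldl pvUpd PySem.Dict.empty
      = (PySem.Dict.counter ps).items.foldl pvG PySem.Dict.empty := by
  induction ps using List.reverseRecOn with
  | nil => rfl
  | append_singleton ps p ih =>
    rw [List.foldl_append, List.foldl_cons, List.foldl_nil,
      PySem.Dict.counter_append_singleton]
    by_cases hc : (PySem.Dict.counter ps).contains p = true
    · have hmem : p ∈ (PySem.Dict.counter ps).items.map Prod.fst := by
        have h := hc
        rw [PySem.Dict.contains_eq_decide_mem_keys] at h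
        have hk := of_decide_eq_true h
        simpa [PySem.Dict.keys] using hk
      have hnd : ((PySem.Dict.counter ps).items.map Prod.fst).Nodup := by
        have := PySem.Dict.nodup_keys_counter ps
        simpa [PySem.Dict.keys] using this
      rw [PySem.Dict.modify, PySem.Dict.items_insert_of_contains _ _ hc]
      rw [pv_bump _ p _ hnd hmem, ← ih]
      simp only [pvUpd]
      congr 2
      rw [pv_getD_nfold ps p, PySem.Dict.getD_counter]
    · have hc' : (PySem.Dict.counter ps).contains p = false := Bool.of_not_eq_true hc
      have hcount : ps.count p = 0 := by
        rw [PySem.Dict.contains_counter] at hc'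
        have hmem : p ∉ ps := by simpa using hc'
        exact List.count_eq_zero.mpr hmem
      rw [PySem.Dict.modify, PySem.Dict.items_insert_of_not_contains _ _ hc',
        PySem.Dict.getD_of_not_contains _ _ hc']
      rw [List.foldl_append, List.foldl_cons, List.foldl_nil, ← ih]
      simp only [pvUpd, pvG]
      congr 2
      rw [pv_getD_nfold ps p, hcount]
      norm_num

-- ===== VERDICT (by name: the statement is the Claim_ definition above) =====
theorem generate_ngram_map_spec : Claim_equal_generate_ngram_map := by
  intro text n _
  unfold Spec_generate_ngram_map generate_ngram_map generate_ngram_map_alt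
  by_cases hn : n < 0
  · rw [if_pos hn, PySem.List.pyRange_one_eq_nil (by omega)]
    simp only [pvZipStar_nil, List.map_nil, List.foldl_nil]
    rfl
  · rw [if_neg hn]
    dsimp only
    push_neg at hn
    obtain ⟨nn, rfl⟩ : ∃ nn : Nat, n = ↑nn := ⟨n.toNat, (Int.toNat_of_nonneg hn).symm⟩
    set letters := text.toList with hlet
    -- A side: windows
    have hlists : (PySem.List.pyRange 0 (↑nn + 1) 1).map
        (fun i => PySem.List.slice letters (some i) none) =
        (List.range (nn + 1)).map (fun k => letters.drop k) := by
      rw [PySem.List.pyRange_one]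
      have h1 : ((↑nn + 1 - 0 : Int)).toNat = nn + 1 := by omega
      rw [h1, List.map_map]
      apply List.map_congr_left
      intro k _
      have : ((0 : Int) + ↑k) = (↑k : Int) := by ring
      simp only [Function.comp_apply, this, PySem.List.slice_from_natCast]
    have hK : ((PySem.Str.len text - ↑nn - 0 : Int)).toNat = letters.length + 1 - (nn + 1) := by
      rw [PySem.Str.len_eq, ← hlet]; omega
    rw [hlists, pvZipStar_windows (nn + 1) (by omega) letters]
    set K := letters.length + 1 - (nn + 1) with hKdef
    set ps := (List.range K).map (pvPairAt letters nn) with hps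
    -- A's fold over windows = fold of pvUpd over ps
    have hA : ((List.range K).map (fun j => (letters.drop j).take (nn + 1))).foldl pvStepA
        PySem.Dict.empty = ps.foldl pvUpd PySem.Dict.empty := by
      rw [List.foldl_map, hps, List.foldl_map]
      apply PySem.List.foldl_congr_mem
      intro acc k hkmem
      have hk : k < K := List.mem_range.mp hkmem
      exact pv_stepA_eq letters nn k (by omega) acc
    -- B's stage-1 fold = counter of ps
    have hB1 : (PySem.List.pyRange 0 (PySem.Str.len text - ↑nn) 1).foldl
        (pvPairStep letters ↑nn) PySem.Dict.empty = PySem.Dict.counter ps := by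
      rw [PySem.List.pyRange_one, hK, List.foldl_map]
      have h1 : (List.range K).foldl (fun d k => pvPairStep letters ↑nn d ((0 : Int) + ↑k))
          PySem.Dict.empty
          = (List.range K).foldl (fun d k =>
              PySem.Dict.insert d (pvPairAt letters nn k)
                (d.getD (pvPairAt letters nn k) 0 + 1)) PySem.Dict.empty := by
        apply PySem.List.foldl_congr_mem
        intro acc k hkmem
        have hk : k < K := List.mem_range.mp hkmem
        have hz : ((0 : Int) + ↑k) = (↑k : Int) := by ring
        rw [hz]
        exact pv_pairStep_eq letters nn k (by omega) acc
      have h2 : ps.foldl (fun (d : PySem.Dict (String × String) Int) p =>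
            d.insert p (d.getD p 0 + 1)) PySem.Dict.empty
          = (List.range K).foldl (fun d k =>
              PySem.Dict.insert d (pvPairAt letters nn k)
                (d.getD (pvPairAt letters nn k) 0 + 1)) PySem.Dict.empty := by
        rw [hps, List.foldl_map]
      rw [h1, ← h2, PySem.Dict.foldl_insert_getD_add_one_eq_counter]
    -- B's stage-2 fold = pvG fold
    have hB2 : ∀ (L : List ((String × String) × Int)),
        L.foldl pvGroupStep PySem.Dict.empty = L.foldl pvG PySem.Dict.empty := by
      intro L
      apply PySem.List.foldl_congr_mem
      intro acc e _
      exact pv_groupStep_eq acc e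
    rw [hA, hB1, hB2, ← pv_main]
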